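-- pv_equiv track=rewrite | github.com/Emily-chiu/Kata | Alternate_capitalization.py | capitalize
-- ===== SOURCE A (Python) =====
-- def capitalize(s):
--     s.lower()
--     s_list = ['','']
--     for s_num in range(2):
--         new_s = ''
--         if s_num == 0:
--             for ss in range(len(s)):
--                 if ss == 0:
--                     new_s += s[ss].upper()
--
--                 elif ss % 2 == 0:
--                     new_s += s[ss].upper()
--
--                 else:
--                     new_s += s[ss]
--
--         if s_num == 1:
--             for ss in range(len(s)):
--                 if ss == 0:
--                     new_s += s[ss]
--
--                 elif ss % 2 == 1:
--                     new_s += s[ss].upper()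
--
--                 else:
--                     new_s += s[ss]
--
--         s_list[s_num] = new_s
--
--     return s_list
-- ===== SOURCE B (Python) =====
-- def capitalize(s):
--     s0, s1 = [], []
--     for i, c in enumerate(s):
--         if i % 2 == 0:
--             s0.append(c.upper())
--             s1.append(c)
--         else:
--             s0.append(c)
--             s1.append(c.upper())
--     return [''.join(s0), ''.join(s1)]
-- ===== Notes on version B (the rewrite author's own statement) =====
-- stated objective: simpler
-- what changed: Replaced A's outer selector loop with dead guards and two separate index-based scans by a single enumerate pass that builds both alternately-capitalized strings simultaneously in char lists.
import Mathlib
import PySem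

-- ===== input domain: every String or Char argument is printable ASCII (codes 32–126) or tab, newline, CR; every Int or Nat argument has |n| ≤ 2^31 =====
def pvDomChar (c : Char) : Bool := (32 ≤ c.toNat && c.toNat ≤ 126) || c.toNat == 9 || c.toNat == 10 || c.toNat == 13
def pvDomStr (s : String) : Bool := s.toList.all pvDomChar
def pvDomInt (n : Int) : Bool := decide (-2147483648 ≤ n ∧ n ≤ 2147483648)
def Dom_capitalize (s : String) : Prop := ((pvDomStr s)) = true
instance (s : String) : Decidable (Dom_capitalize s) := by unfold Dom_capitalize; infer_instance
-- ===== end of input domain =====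

-- B replaces A's selector loop with dead guards and two separate index scans by one
-- enumerate pass building both strings simultaneously (objective: simpler).

-- ===== PORT A =====
-- body of A's first inner loop (s_num == 0), over index ss into cs
def pvLoopA0 (cs : List Char) (new_s : List Char) (ss : Int) : List Char :=
  if ss = 0 then new_s ++ [PySem.Chars.upperChar (PySem.List.pyGetD cs ss ' ')]
  else if PySem.Int.mod ss 2 = 0 then new_s ++ [PySem.Chars.upperChar (PySem.List.pyGetD cs ss ' ')]
  else new_s ++ [PySem.List.pyGetD cs ss ' ']

-- body of A's second inner loop (s_num == 1)
def pvLoopA1 (cs : List Char) (new_s : List Char) (ss : Int) : List Char :=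
  if ss = 0 then new_s ++ [PySem.List.pyGetD cs ss ' ']
  else if PySem.Int.mod ss 2 = 1 then new_s ++ [PySem.Chars.upperChar (PySem.List.pyGetD cs ss ' ')]
  else new_s ++ [PySem.List.pyGetD cs ss ' ']

def capitalize (s : String) : List String :=
  let cs := s.toList
  -- s.lower() is a no-op in A (result discarded)
  let s_list : List String := ["", ""]
  let s_list := (PySem.List.pyRange 0 2 1).foldl (fun s_list s_num =>
    let new_s : List Char := []
    let new_s :=
      if s_num = 0 then (PySem.List.pyRange 0 cs.length 1).foldl (pvLoopA0 cs) new_s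
      else new_s
    let new_s :=
      if s_num = 1 then (PySem.List.pyRange 0 cs.length 1).foldl (pvLoopA1 cs) new_s
      else new_s
    PySem.List.pySetD s_list s_num (String.ofList new_s)) s_list
  s_list

-- ===== PORT B =====
-- body of B's single pass: one (index, char) step updating both accumulators
def pvB (q : List Char × List Char) (ic : Int × Char) : List Char × List Char :=
  if PySem.Int.mod ic.1 2 = 0 then (q.1 ++ [PySem.Chars.upperChar ic.2], q.2 ++ [ic.2])
  else (q.1 ++ [ic.2], q.2 ++ [PySem.Chars.upperChar ic.2])

def capitalize_alt (s : String) : List String :=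
  let p := (PySem.List.enumerate s.toList 0).foldl pvB ([], [])
  [String.ofList p.1, String.ofList p.2]

-- ===== PRECONDITION & SPEC =====
def Spec_capitalize (s : String) (out : List String) : Prop := out = capitalize_alt s
instance (s : String) (out : List String) : Decidable (Spec_capitalize s out) := by unfold Spec_capitalize; infer_instance

-- ===== CLAIM (what is proved, stated in full; the proofs are below) =====
def Claim_equal_capitalize : Prop := ∀ (s : String), Dom_capitalize s → Spec_capitalize s (capitalize s)

-- ===== LEMMAS AND PROOFS =====

-- A's loop bodies as folds over (index, char) pairs
def pvA0 (acc : List Char) (p : Int × Char) : List Char :=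
  if p.1 = 0 then acc ++ [PySem.Chars.upperChar p.2]
  else if PySem.Int.mod p.1 2 = 0 then acc ++ [PySem.Chars.upperChar p.2]
  else acc ++ [p.2]

def pvA1 (acc : List Char) (p : Int × Char) : List Char :=
  if p.1 = 0 then acc ++ [p.2]
  else if PySem.Int.mod p.1 2 = 1 then acc ++ [PySem.Chars.upperChar p.2]
  else acc ++ [p.2]

theorem pvMod2 (i : Int) : PySem.Int.mod i 2 = 0 ∨ PySem.Int.mod i 2 = 1 := by
  rw [PySem.Int.mod_eq_emod_of_pos (by norm_num : (0:Int) < 2)]; omega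

-- the i = 0 branches of pvA0/pvA1 are redundant (0 % 2 = 0)
theorem pvA0_eq (acc : List Char) (p : Int × Char) :
    pvA0 acc p = if PySem.Int.mod p.1 2 = 0 then acc ++ [PySem.Chars.upperChar p.2] else acc ++ [p.2] := by
  unfold pvA0
  by_cases h : p.1 = 0
  · simp [h]
  · simp [h]

theorem pvA1_eq (acc : List Char) (p : Int × Char) :
    pvA1 acc p = if PySem.Int.mod p.1 2 = 0 then acc ++ [p.2] else acc ++ [PySem.Chars.upperChar p.2] := by
  unfold pvA1
  by_cases h : p.1 = 0
  · simp [h]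
  · rcases pvMod2 p.1 with h2 | h2 <;> simp only [h, h2, if_false, if_true] <;> norm_num

theorem pvB_pair (l : List (Int × Char)) (a b : List Char) :
    l.foldl pvB (a, b) = (l.foldl pvA0 a, l.foldl pvA1 b) := by
  induction l generalizing a b with
  | nil => simp
  | cons p l ih =>
    simp only [List.foldl_cons]
    rw [pvA0_eq, pvA1_eq]
    unfold pvB
    rcases pvMod2 p.1 with h | h
    · rw [if_pos h, if_pos h, if_pos h]; exact ih _ _
    · have h0 : ¬ PySem.Int.mod p.1 2 = 0 := by rw [h]; norm_num
      rw [if_neg h0, if_neg h0, if_neg h0]; exact ih _ _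

theorem pvLoopA0_eq (cs : List Char) :
    pvLoopA0 cs = fun acc j => pvA0 acc (j, PySem.List.pyGetD cs j ' ') := rfl

theorem pvLoopA1_eq (cs : List Char) :
    pvLoopA1 cs = fun acc j => pvA1 acc (j, PySem.List.pyGetD cs j ' ') := rfl

-- ===== VERDICT (by name: the statement is the Claim_ definition above) =====
theorem capitalize_spec : Claim_equal_capitalize := by
  intro s _
  show capitalize s = capitalize_alt s
  simp only [capitalize, capitalize_alt]
  rw [pvB_pair, pvLoopA0_eq, pvLoopA1_eq,
    PySem.List.enumerate_eq_map_pyRange s.toList ' ', List.foldl_map, List.foldl_map]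
  simp [show PySem.List.pyRange 0 2 1 = [0, 1] from by decide,
    PySem.List.pySetD, PySem.List.pySet?, PySem.List.pyIdx?]
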